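-- pv_equiv track=rewrite | github.com/thbaymet/python-intro | basics/easy_functions.py | sort_only_composite_numbers
-- ===== SOURCE A (Python) =====
-- def is_prime_number(number):
--     """
--     Defines whether number is a prime number or not:
--     Prime numbers are 2, 3, 5, 7
--     :param number: an integer
--     :return: True if the "number" is a prime number, False else
--     """
--     if number > 1:
--         for i in range(2, number):
--             if number % i == 0:
--                 return False
--         return True
--     return False
--
-- def sort_only_composite_numbers(array):
--     """
--     Sort only composite numbers in the "array", prime numbers stay in the same place.
--     :param array: array of integers
--     :return: array on which only composite numbers are sorted
--     """
--     composites = sorted([n for n in array if not is_prime_number(n)])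
--     i = 0
--     for index, number in enumerate(array):
--         if is_prime_number(number):
--             array[index] = number
--         else:
--             array[index] = composites[i]
--             i += 1
--     return array
-- ===== SOURCE B (Python) =====
-- def is_prime_number(number):
--     """
--     Defines whether number is a prime number or not:
--     Prime numbers are 2, 3, 5, 7
--     :param number: an integer
--     :return: True if the "number" is a prime number, False else
--     """
--     if number > 1:
--         for i in range(2, number):
--             if number % i == 0:
--                 return False
--         return True
--     return False
--
-- def sort_only_composite_numbers(array):
--     """
--     Sort only composite numbers in the "array", prime numbers stay in the same place.
--     In-place exchange (selection-style) sort restricted to composite slots: no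
--     extraction, no sorted(), no reinsertion pass - whenever a later composite is
--     smaller than the composite at slot i, swap the two.  Primality of each slot is
--     computed once up front (swaps only exchange composites, so the flags stay valid).
--     """
--     n = len(array)
--     prime = [is_prime_number(v) for v in array]
--     for i in range(n):
--         if prime[i]:
--             continue
--         for j in range(i + 1, n):
--             if not prime[j] and array[j] < array[i]:
--                 array[i], array[j] = array[j], array[i]
--     return array
-- ===== Notes on version B (the rewrite author's own statement) =====
-- stated objective: alternative
-- what changed: Replaces A's extract-sort-reinsert (build a sorted() list of the composites, then an enumerate pass copying them back over the composite slots) by an in-place quadratic exchange sort: primality flags are computed once per slot, then for each composite slot i any smaller composite found at a later slot is swapped in; no extraction and no library sort.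
import Mathlib
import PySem

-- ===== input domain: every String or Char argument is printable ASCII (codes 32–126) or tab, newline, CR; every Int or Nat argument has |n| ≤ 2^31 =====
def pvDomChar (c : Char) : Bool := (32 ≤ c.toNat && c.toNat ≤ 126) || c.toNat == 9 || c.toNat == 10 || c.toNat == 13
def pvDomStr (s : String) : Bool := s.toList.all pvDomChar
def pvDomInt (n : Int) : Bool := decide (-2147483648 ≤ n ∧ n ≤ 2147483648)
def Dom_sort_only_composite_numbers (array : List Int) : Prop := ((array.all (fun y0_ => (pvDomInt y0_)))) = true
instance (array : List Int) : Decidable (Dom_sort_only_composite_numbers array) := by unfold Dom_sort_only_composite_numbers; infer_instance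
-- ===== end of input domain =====

-- B replaces A's extract-sort-reinsert (sorted() of the composites, then an
-- enumerate pass copying them back) by an in-place quadratic exchange sort over the
-- composite slots, with the primality flags computed once per slot (alternative
-- algorithm). Both Pythons mutate `array` in place and return it; the equivalence
-- proved here is about the returned value (both perform the same net mutation).


-- ===== PORT A =====
-- is_prime_number, shared verbatim by both Pythons; the early-return
-- 'for i in range(2, number)' is the tail-recursive scan pv_prime_scan.
def pv_prime_scan (number : Int) (i : Int) : Bool :=
  if i < number then
    if PySem.Int.mod number i == 0 then false
    else pv_prime_scan number (i + 1)
  else true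
termination_by (number - i).toNat
decreasing_by omega

def pv_is_prime (number : Int) : Bool :=
  if number > 1 then pv_prime_scan number 2 else false

-- A's enumerate loop: rewrite every slot, composites drawn from composites[i] with a
-- running counter i. composites[i] is always in range when A runs (one composite value
-- per composite slot), so the pyGetD default 0 is never returned.
def sortA_go (comps : List Int) (xs : List Int) (i : Int) : List Int :=
  match xs with
  | [] => []
  | n :: rest =>
    if pv_is_prime n then n :: sortA_go comps rest i
    else (PySem.List.pyGetD comps i 0) :: sortA_go comps rest (i + 1)

def sort_only_composite_numbers (array : List Int) : List Int :=
  let composites := PySem.List.sorted (array.filter (fun n => !pv_is_prime n)) (fun x => x) false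
  sortA_go composites array 0

-- ===== PORT B =====
-- in-place exchange (selection-style) sort restricted to composite slots; `flags` is
-- the up-front list 'prime = [is_prime_number(v) for v in array]' (swaps only exchange
-- composites, so the flags stay valid throughout).
-- inner loop 'for j in range(i+1, n)' swapping any smaller later composite into slot i
def bSwapLoop (arr : List Int) (flags : List Bool) (i : Int) (js : List Int) : List Int :=
  match js with
  | [] => arr
  | j :: rest =>
    if !(PySem.List.pyGetD flags j false)
        && PySem.List.pyGetD arr j 0 < PySem.List.pyGetD arr i 0 then
      bSwapLoop
        (PySem.List.pySetD (PySem.List.pySetD arr i (PySem.List.pyGetD arr j 0)) j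
          (PySem.List.pyGetD arr i 0)) flags i rest
    else bSwapLoop arr flags i rest

-- outer loop 'for i in range(n)' with the 'continue' on prime slots
def bOuterLoop (arr : List Int) (flags : List Bool) (n : Int) (is_ : List Int) : List Int :=
  match is_ with
  | [] => arr
  | i :: rest =>
    if PySem.List.pyGetD flags i false then bOuterLoop arr flags n rest
    else bOuterLoop (bSwapLoop arr flags i (PySem.List.pyRange (i + 1) n 1)) flags n rest

def sort_only_composite_numbers_alt (array : List Int) : List Int :=
  let flags := array.map (fun v => pv_is_prime v)
  bOuterLoop array flags (array.length : Int) (PySem.List.pyRange 0 (array.length : Int) 1)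

-- ===== PRECONDITION & SPEC =====
def Spec_sort_only_composite_numbers (array : List Int) (out : List Int) : Prop := out = sort_only_composite_numbers_alt array
instance (array : List Int) (out : List Int) : Decidable (Spec_sort_only_composite_numbers array out) := by unfold Spec_sort_only_composite_numbers; infer_instance

-- ===== CLAIM (what is proved, stated in full; the proofs are below) =====
def Claim_equal_sort_only_composite_numbers : Prop := ∀ (array : List Int), Dom_sort_only_composite_numbers array → Spec_sort_only_composite_numbers array (sort_only_composite_numbers array)

-- ===== LEMMAS AND PROOFS =====

-- Common shape both ports reduce to: walk xs, keep primes, draw composite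
-- replacements in order from cs.
def pvMerge (xs : List Int) (cs : List Int) : List Int :=
  match xs with
  | [] => []
  | n :: rest =>
    if pv_is_prime n then n :: pvMerge rest cs
    else cs.headD 0 :: pvMerge rest cs.tail

-- A's loop is pvMerge on the not-yet-consumed suffix of comps.
lemma sortA_go_eq_merge (comps xs : List Int) (i : Int) (hi : 0 ≤ i) :
    sortA_go comps xs i = pvMerge xs (comps.drop i.toNat) := by
  induction xs generalizing i with
  | nil => rfl
  | cons n xs ih =>
    simp only [sortA_go, pvMerge]
    split_ifs with h
    · rw [ih i hi]
    · rw [ih (i+1) (by omega)]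
      have h1 : (i + 1).toNat = i.toNat + 1 := by omega
      rw [h1, ← List.tail_drop]
      congr 1
      rw [PySem.List.pyGetD_of_nonneg _ _ hi]
      rw [List.headD_eq_head?_getD, List.head?_drop, List.getD_eq_getElem?_getD]

-- the values of arr at the composite positions of xs, in index order
def pvMask : List Int → List Int → List Int
  | x :: xs', a :: arr' => if pv_is_prime x then pvMask xs' arr' else a :: pvMask xs' arr'
  | _, _ => []

lemma pvMask_self (xs : List Int) : pvMask xs xs = xs.filter (fun n => !pv_is_prime n) := by
  induction xs with
  | nil => rfl
  | cons x xs ih => simp only [pvMask, List.filter_cons]; split_ifs with h <;> simp_all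

-- composite index list of xs
def pvKs (xs : List Int) : List Nat :=
  (List.range xs.length).filter (fun k => !pv_is_prime (xs.getD k 0))

lemma pvKs_cons (x : Int) (xs : List Int) :
    pvKs (x :: xs) = (if pv_is_prime x then [] else [0]) ++ (pvKs xs).map (· + 1) := by
  unfold pvKs
  rw [List.length_cons, List.range_succ_eq_map, List.filter_cons]
  simp only [List.getD_cons_zero, List.filter_map]
  split_ifs <;> simp_all [Function.comp_def, Nat.succ_eq_add_one]

lemma pvMask_eq (xs arr : List Int) (hlen : arr.length = xs.length) :
    pvMask xs arr = (pvKs xs).map (fun k => arr.getD k 0) := by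
  induction xs generalizing arr with
  | nil => simp [pvMask.eq_def, pvKs]
  | cons x xs ih =>
    cases arr with
    | nil => simp at hlen
    | cons a arr' =>
      rw [pvKs_cons]
      simp only [pvMask, List.map_append, List.map_map]
      split_ifs with h
      · simpa [Function.comp_def] using ih arr' (by simpa using hlen)
      · simpa [Function.comp_def] using ih arr' (by simpa using hlen)

-- state invariant of B's loops, relative to the original xs
def pvInv (xs arr : List Int) : Prop :=
  arr.length = xs.length ∧
  (∀ k, k < xs.length → pv_is_prime (xs.getD k 0) = true → arr.getD k 0 = xs.getD k 0) ∧
  (pvMask xs arr).Perm (pvMask xs xs)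

-- the up-front flag list reads off the primality of the ORIGINAL slot
lemma pvFlag (xs : List Int) (k : Nat) (hk : k < xs.length) :
    (xs.map (fun v => pv_is_prime v)).getD k false = pv_is_prime (xs.getD k 0) := by
  rw [List.getD_eq_getElem (hn := by simpa using hk), List.getD_eq_getElem (hn := hk),
    List.getElem_map]

-- composite pairs whose left index is < i are already ordered
def pvSOrd (xs arr : List Int) (i : Nat) : Prop :=
  ∀ k l : Nat, k < l → l < xs.length → k < i →
    pv_is_prime (xs.getD k 0) = false → pv_is_prime (xs.getD l 0) = false →
    arr.getD k 0 ≤ arr.getD l 0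

-- arr[i] is ≤ every composite at positions (i, j)
def pvMOrd (xs arr : List Int) (i j : Nat) : Prop :=
  ∀ l : Nat, i < l → l < j → pv_is_prime (xs.getD l 0) = false →
    arr.getD i 0 ≤ arr.getD l 0

-- the swap step
def pvUpd (arr : List Int) (i j : Nat) : List Int :=
  (arr.set i (arr.getD j 0)).set j (arr.getD i 0)

lemma pvUpd_getD (arr : List Int) (i j k : Nat) (hi : i < arr.length)
    (hj : j < arr.length) (hne : i ≠ j) :
    (pvUpd arr i j).getD k 0 =
      if k = i then arr.getD j 0 else if k = j then arr.getD i 0 else arr.getD k 0 := by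
  unfold pvUpd
  simp only [List.getD_eq_getElem?_getD, List.getElem?_set, List.length_set]
  rcases eq_or_ne k i with rfl | hki
  · simp [hi, hj, Ne.symm hne]
  · rcases eq_or_ne k j with rfl | hkj
    · simp [hi, hj, hki]
    · simp [hki, hkj, Ne.symm hki, Ne.symm hkj]

lemma pvMapTranspose (ks : List Nat) (f f' : Nat → Int) (i j : Nat)
    (hnd : ks.Nodup) (hi : i ∈ ks) (hj : j ∈ ks) (hne : i ≠ j)
    (hfi : f' i = f j) (hfj : f' j = f i)
    (hother : ∀ k ∈ ks, k ≠ i → k ≠ j → f' k = f k) :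
    (ks.map f').Perm (ks.map f) := by
  have p1 : ks.Perm (i :: ks.erase i) := List.perm_cons_erase hi
  have hj1 : j ∈ ks.erase i := (hnd.mem_erase_iff).2 ⟨Ne.symm hne, hj⟩
  have p2 : (ks.erase i).Perm (j :: (ks.erase i).erase j) := List.perm_cons_erase hj1
  have p3 : ks.Perm (i :: j :: (ks.erase i).erase j) := p1.trans (List.Perm.cons i p2)
  have hrest : ∀ k ∈ (ks.erase i).erase j, k ≠ i ∧ k ≠ j ∧ k ∈ ks := by
    intro k hk
    have h1 : k ∈ ks.erase i := List.mem_of_mem_erase hk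
    have hkj : k ≠ j := (((hnd.erase i).mem_erase_iff).1 hk).1
    have hki : k ≠ i := ((hnd.mem_erase_iff).1 h1).1
    exact ⟨hki, hkj, List.mem_of_mem_erase h1⟩
  have e1 : (i :: j :: (ks.erase i).erase j).map f'
      = f j :: f i :: ((ks.erase i).erase j).map f := by
    simp only [List.map_cons, hfi, hfj]
    congr 2
    exact List.map_congr_left (fun k hk => hother k (hrest k hk).2.2 (hrest k hk).1 (hrest k hk).2.1)
  have p4 : (f j :: f i :: ((ks.erase i).erase j).map f).Perm
      ((i :: j :: (ks.erase i).erase j).map f) := List.Perm.swap _ _ _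
  exact ((p3.map f').trans (e1 ▸ p4)).trans (p3.map f).symm

lemma pvInner_spec (xs : List Int) (i : Int) (hi0 : 0 ≤ i) (hiLen : i < (xs.length : Int))
    (hPi : pv_is_prime (xs.getD i.toNat 0) = false) :
    ∀ (m : Nat) (j : Int) (arr : List Int), i < j → ((xs.length : Int) - j).toNat = m →
      pvInv xs arr → pvSOrd xs arr i.toNat → pvMOrd xs arr i.toNat j.toNat →
      pvInv xs (bSwapLoop arr (xs.map (fun v => pv_is_prime v)) i (PySem.List.pyRange j (xs.length : Int) 1)) ∧
      pvSOrd xs (bSwapLoop arr (xs.map (fun v => pv_is_prime v)) i (PySem.List.pyRange j (xs.length : Int) 1)) i.toNat ∧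
      pvMOrd xs (bSwapLoop arr (xs.map (fun v => pv_is_prime v)) i (PySem.List.pyRange j (xs.length : Int) 1)) i.toNat xs.length := by
  intro m
  induction m with
  | zero =>
    intro j arr hij hm hInv hS hM
    rw [PySem.List.pyRange_one_eq_nil (by omega : (xs.length : Int) ≤ j)]
    exact ⟨hInv, hS, fun l hil hl hc => hM l hil (by omega) hc⟩
  | succ m ih =>
    intro j arr hij hm hInv hS hM
    have hjlen : j < (xs.length : Int) := by omega
    have hj0 : (0:Int) ≤ j := by omega
    obtain ⟨hlen, hfix, hperm⟩ := hInv
    have hiN : i.toNat < xs.length := by omega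
    have hjN : j.toNat < xs.length := by omega
    have hijN : i.toNat < j.toNat := by omega
    have hj1 : (j + 1).toNat = j.toNat + 1 := by omega
    rw [PySem.List.pyRange_one_cons hjlen]
    simp only [bSwapLoop, PySem.List.pyGetD_of_nonneg arr (0:Int) hj0,
      PySem.List.pyGetD_of_nonneg (α := Int) arr (0:Int) hi0,
      PySem.List.pyGetD_of_nonneg (α := Bool) _ (false) hj0,
      PySem.List.pySetD_of_nonneg (α := Int) _ _ hj0,
      PySem.List.pySetD_of_nonneg (α := Int) _ _ hi0]
    rw [pvFlag xs j.toNat hjN]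
    by_cases hc : pv_is_prime (xs.getD j.toNat 0) = false ∧
        arr.getD j.toNat 0 < arr.getD i.toNat 0
    · rw [if_pos (by
        simp only [Bool.and_eq_true, Bool.not_eq_true', decide_eq_true_eq]
        exact hc)]
      have hG := fun k => pvUpd_getD arr i.toNat j.toNat k (by omega) (by omega) (by omega)
      have hPjx : pv_is_prime (xs.getD j.toNat 0) = false := hc.1
      have hInv' : pvInv xs (pvUpd arr i.toNat j.toNat) := by
        refine ⟨by simp [pvUpd, hlen], ?_, ?_⟩
        · intro k hk hpk
          rw [hG k]
          rcases eq_or_ne k i.toNat with rfl | hki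
          · rw [hPi] at hpk; cases hpk
          · rcases eq_or_ne k j.toNat with rfl | hkj
            · rw [hPjx] at hpk; cases hpk
            · rw [if_neg hki, if_neg hkj]; exact hfix k hk hpk
        · refine List.Perm.trans ?_ hperm
          rw [pvMask_eq xs _ (by simp [pvUpd, hlen]), pvMask_eq xs arr hlen]
          refine pvMapTranspose (pvKs xs) _ _ i.toNat j.toNat
            (List.Nodup.filter _ (List.nodup_range)) ?_ ?_ (by omega) ?_ ?_ ?_
          · exact List.mem_filter.2 ⟨List.mem_range.2 hiN,
              by simp only [Bool.not_eq_true']; exact hPi⟩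
          · exact List.mem_filter.2 ⟨List.mem_range.2 hjN,
              by simp only [Bool.not_eq_true']; exact hPjx⟩
          · rw [hG i.toNat, if_pos rfl]
          · rw [hG j.toNat, if_neg (by omega), if_pos rfl]
          · intro k _ hki hkj; rw [hG k, if_neg hki, if_neg hkj]
      have hS' : pvSOrd xs (pvUpd arr i.toNat j.toNat) i.toNat := by
        intro k l hkl hl hki hpk hpl
        rw [hG k, if_neg (by omega), if_neg (by omega), hG l]
        rcases eq_or_ne l i.toNat with rfl | hli
        · rw [if_pos rfl]
          exact hS k j.toNat (by omega) hjN hki hpk hPjx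
        · rcases eq_or_ne l j.toNat with rfl | hlj
          · rw [if_neg hli, if_pos rfl]
            exact hS k i.toNat (by omega) hiN hki hpk hPi
          · rw [if_neg hli, if_neg hlj]
            exact hS k l hkl hl hki hpk hpl
      have hM' : pvMOrd xs (pvUpd arr i.toNat j.toNat) i.toNat (j + 1).toNat := by
        intro l hil hl hpl
        rw [hG i.toNat, if_pos rfl, hG l, if_neg (by omega)]
        rcases eq_or_ne l j.toNat with rfl | hlj
        · rw [if_pos rfl]; exact le_of_lt hc.2
        · rw [if_neg hlj]
          exact le_of_lt (lt_of_lt_of_le hc.2 (hM l hil (by omega) hpl))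
      exact ih (j + 1) _ (by omega) (by omega) hInv' hS' hM'
    · rw [if_neg ?_]
      · have hM' : pvMOrd xs arr i.toNat (j + 1).toNat := by
          intro l hil hl hpl
          rcases eq_or_ne l j.toNat with rfl | hlj
          · by_contra hlt
            exact hc ⟨hpl, by omega⟩
          · exact hM l hil (by omega) hpl
        exact ih (j + 1) arr (by omega) (by omega) ⟨hlen, hfix, hperm⟩ hS hM'
      · simp only [Bool.and_eq_true, Bool.not_eq_true', decide_eq_true_eq, not_and]
        intro h1 h2
        exact hc ⟨h1, h2⟩

lemma pvOuter_spec (xs : List Int) :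
    ∀ (m : Nat) (i : Int) (arr : List Int), 0 ≤ i → ((xs.length : Int) - i).toNat = m →
      pvInv xs arr → pvSOrd xs arr i.toNat →
      pvInv xs (bOuterLoop arr (xs.map (fun v => pv_is_prime v)) (xs.length : Int) (PySem.List.pyRange i (xs.length : Int) 1)) ∧
      pvSOrd xs (bOuterLoop arr (xs.map (fun v => pv_is_prime v)) (xs.length : Int) (PySem.List.pyRange i (xs.length : Int) 1)) xs.length := by
  intro m
  induction m with
  | zero =>
    intro i arr hi0 hm hInv hS
    rw [PySem.List.pyRange_one_eq_nil (by omega : (xs.length : Int) ≤ i)]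
    exact ⟨hInv, fun k l hkl hl hki hpk hpl => hS k l hkl hl (by omega) hpk hpl⟩
  | succ m ih =>
    intro i arr hi0 hm hInv hS
    have hilen : i < (xs.length : Int) := by omega
    have hiN : i.toNat < xs.length := by omega
    have hi1 : (i + 1).toNat = i.toNat + 1 := by omega
    rw [PySem.List.pyRange_one_cons hilen]
    simp only [bOuterLoop, PySem.List.pyGetD_of_nonneg (α := Bool) _ (false) hi0]
    rw [pvFlag xs i.toNat hiN]
    by_cases hp : pv_is_prime (xs.getD i.toNat 0) = true
    · rw [if_pos hp]
      have hS' : pvSOrd xs arr (i + 1).toNat := by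
        intro k l hkl hl hki hpk hpl
        rcases eq_or_ne k i.toNat with rfl | hki'
        · rw [hp] at hpk; cases hpk
        · exact hS k l hkl hl (by omega) hpk hpl
      exact ih (i + 1) arr (by omega) (by omega) hInv hS'
    · rw [if_neg hp]
      have hPi : pv_is_prime (xs.getD i.toNat 0) = false := Bool.eq_false_iff.2 hp
      have hM : pvMOrd xs arr i.toNat (i + 1).toNat := by
        intro l hil hl hpl; omega
      obtain ⟨hInv', hS', hM'⟩ := pvInner_spec xs i hi0 hilen hPi
        ((xs.length : Int) - (i + 1)).toNat (i + 1) arr (by omega) rfl hInv hS hM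
      have hS'' : pvSOrd xs
          (bSwapLoop arr (xs.map (fun v => pv_is_prime v)) i (PySem.List.pyRange (i + 1) (xs.length : Int) 1))
          (i + 1).toNat := by
        intro k l hkl hl hki hpk hpl
        rcases eq_or_ne k i.toNat with rfl | hki'
        · exact hM' l (by omega) hl hpl
        · exact hS' k l hkl hl (by omega) hpk hpl
      exact ih (i + 1) _ (by omega) (by omega) hInv' hS''

-- reconstruction: a list of the right length agreeing with xs on xs's prime slots
-- is pvMerge of its own composite values
lemma pvMerge_mask (xs arr : List Int) (hlen : arr.length = xs.length)
    (hp : ∀ k, k < xs.length → pv_is_prime (xs.getD k 0) = true → arr.getD k 0 = xs.getD k 0) :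
    pvMerge xs (pvMask xs arr) = arr := by
  induction xs generalizing arr with
  | nil =>
    have : arr = [] := List.length_eq_zero_iff.1 (by simpa using hlen)
    simp [this, pvMerge]
  | cons x xs ih =>
    cases arr with
    | nil => simp at hlen
    | cons a arr' =>
      have hlen' : arr'.length = xs.length := by simpa using hlen
      have hp' : ∀ k, k < xs.length → pv_is_prime (xs.getD k 0) = true →
          arr'.getD k 0 = xs.getD k 0 := by
        intro k hk hpk
        have := hp (k + 1) (by simpa using hk) (by simpa using hpk)
        simpa using this
      simp only [pvMask, pvMerge]
      split_ifs with h
      · have ha : a = x := by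
          have := hp 0 (by simp) (by simpa using h)
          simpa using this
        rw [ha, ih arr' hlen' hp']
      · simp only [List.headD_cons, List.tail_cons]
        rw [ih arr' hlen' hp']

lemma pvMask_pairwise (xs arr : List Int) (hlen : arr.length = xs.length)
    (hS : pvSOrd xs arr xs.length) : (pvMask xs arr).Pairwise (· ≤ ·) := by
  rw [pvMask_eq xs arr hlen, List.pairwise_map]
  have hks : (pvKs xs).Pairwise (· < ·) := List.pairwise_lt_range.filter _
  refine hks.imp_of_mem (fun {k l} hk hl hkl => ?_)
  have hk' := List.mem_filter.1 hk
  have hl' := List.mem_filter.1 hl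
  exact hS k l hkl (List.mem_range.1 hl'.1) (List.mem_range.1 hk'.1)
    (by simpa using hk'.2) (by simpa using hl'.2)

-- ===== VERDICT (by name: the statement is the Claim_ definition above) =====
theorem sort_only_composite_numbers_spec : Claim_equal_sort_only_composite_numbers := by
  intro xs _
  unfold Spec_sort_only_composite_numbers
  unfold sort_only_composite_numbers sort_only_composite_numbers_alt
  obtain ⟨⟨hlen, hfix, hperm⟩, hS⟩ := pvOuter_spec xs xs.length 0 xs (le_refl 0)
    (by omega) ⟨rfl, fun _ _ _ => rfl, List.Perm.refl _⟩
    (fun k l _ _ hk _ _ => by omega)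
  set B := bOuterLoop xs (xs.map (fun v => pv_is_prime v)) (xs.length : Int)
    (PySem.List.pyRange 0 (xs.length : Int) 1) with hB
  rw [sortA_go_eq_merge _ _ 0 (le_refl 0)]
  simp only [Int.toNat_zero, List.drop_zero]
  have hsorted : PySem.List.sorted (xs.filter (fun n => !pv_is_prime n)) (fun x => x) false
      = pvMask xs B :=
    PySem.List.sorted_id_eq_of_perm_of_pairwise _ _
      (by rw [← pvMask_self xs]; exact hperm)
      (pvMask_pairwise xs B hlen hS)
  rw [hsorted]
  exact pvMerge_mask xs B hlen hfix
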